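-- pv_equiv track=rewrite | github.com/tammmikel/task-bot | app/services/company_service.py | validate_company_name
-- ===== SOURCE A (Python) =====
-- def validate_company_name(name: str) -> bool:
--     """
--     Проверяет валидность названия компании
--
--     Args:
--         name: Название компании
--
--     Returns:
--         True если название валидно
--     """
--     if not name or not name.strip():
--         return False
--
--     name = name.strip()
--
--     # Проверяем длину
--     if len(name) < 2 or len(name) > 100:
--         return False
--
--     # Проверяем на недопустимые символы
--     invalid_chars = ['<', '>', '"', "'", '&']
--     if any(char in name for char in invalid_chars):
--         return False
--
--     return True
-- ===== SOURCE B (Python) =====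
-- def validate_company_name(name: str) -> bool:
--     # single pass over the stripped string: count length and detect forbidden chars together
--     n = 0
--     ok = True
--     for ch in name.strip():
--         n += 1
--         if ch in '<>"\'&':
--             ok = False
--     return ok and 2 <= n <= 100
-- ===== Notes on version B (the rewrite author's own statement) =====
-- stated objective: alternative
-- what changed: Replaces A's separate emptiness guard, len() bound checks and any()-membership scan over the forbidden-character list with one fold over the stripped string that simultaneously counts the length and flags forbidden characters, followed by a single combined test.
import Mathlib
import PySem

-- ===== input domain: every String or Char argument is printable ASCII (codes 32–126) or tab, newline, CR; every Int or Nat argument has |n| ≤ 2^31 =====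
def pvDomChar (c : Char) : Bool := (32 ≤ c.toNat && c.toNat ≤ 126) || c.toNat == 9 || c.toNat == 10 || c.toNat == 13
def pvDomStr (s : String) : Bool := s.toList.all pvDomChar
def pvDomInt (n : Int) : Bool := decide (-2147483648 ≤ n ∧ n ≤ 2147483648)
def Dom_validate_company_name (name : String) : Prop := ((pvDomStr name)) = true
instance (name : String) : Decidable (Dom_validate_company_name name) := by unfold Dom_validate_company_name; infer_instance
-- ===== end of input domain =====

-- B fuses A's length check and forbidden-character scan into one counting fold over the stripped string (alternative decomposition, same cost).

-- ===== PORT A =====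
def validate_company_name (name : String) : Bool :=
  if PySem.Str.len name == 0 || PySem.Str.len (PySem.Str.strip name) == 0 then
    false
  else
    let name := PySem.Str.strip name
    if PySem.Str.len name < 2 || PySem.Str.len name > 100 then
      false
    else if ["<", ">", "\"", "'", "&"].any (fun c => PySem.Str.isIn c name) then
      false
    else
      true

-- ===== PORT B =====
def validate_company_name_alt (name : String) : Bool :=
  let st := (PySem.Str.strip name).toList.foldl
    (fun (acc : Int × Bool) ch =>
      (acc.1 + 1, if PySem.Chars.isIn [ch] "<>\"'&".toList then false else acc.2))
    (0, true)
  st.2 && decide (2 ≤ st.1) && decide (st.1 ≤ 100)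

-- ===== PRECONDITION & SPEC =====
def Spec_validate_company_name (name : String) (out : Bool) : Prop := out = validate_company_name_alt name
instance (name : String) (out : Bool) : Decidable (Spec_validate_company_name name out) := by unfold Spec_validate_company_name; infer_instance

-- ===== CLAIM (what is proved, stated in full; the proofs are below) =====
def Claim_equal_validate_company_name : Prop := ∀ (name : String), Dom_validate_company_name name → Spec_validate_company_name name (validate_company_name name)

-- ===== LEMMAS AND PROOFS =====

theorem pv_fold_inv (l : List Char) (n : Int) (ok : Bool) :
    l.foldl (fun (acc : Int × Bool) ch =>
      (acc.1 + 1, if PySem.Chars.isIn [ch] "<>\"'&".toList then false else acc.2)) (n, ok)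
    = (n + l.length, ok && !(l.any (fun ch => PySem.Chars.isIn [ch] "<>\"'&".toList))) := by
  induction l generalizing n ok with
  | nil => simp
  | cons c t ih =>
    simp only [List.foldl_cons, List.any_cons, ih, List.length_cons, Prod.mk.injEq]
    refine ⟨by push_cast; ring, ?_⟩
    cases PySem.Chars.isIn [c] "<>\"'&".toList <;> cases ok <;> simp

theorem pv_single_isIn (c : Char) (l : List Char) :
    PySem.Chars.isIn [c] l = l.contains c := by
  by_cases h : c ∈ l
  · have hinf : [c] <:+: l := by
      obtain ⟨s, t, rfl⟩ := List.append_of_mem h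
      exact ⟨s, t, by simp⟩
    rw [(PySem.Chars.isIn_iff_infix [c] l).mpr hinf]
    simpa using h
  · have hn : ¬ ([c] <:+: l) := fun hinf => h (hinf.subset (by simp))
    rw [(PySem.Chars.isIn_eq_false_iff [c] l).mpr hn]
    simpa using h

theorem pv_any_comm (l : List Char) :
    (["<", ">", "\"", "'", "&"].any (fun c => PySem.Chars.isIn c.toList l))
    = l.any (fun ch => PySem.Chars.isIn [ch] "<>\"'&".toList) := by
  rw [show ("<>\"'&".toList) = ['<', '>', '"', '\'', '&'] from rfl]
  simp only [List.any_cons, List.any_nil,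
    show ("<".toList) = ['<'] from rfl, show (">".toList) = ['>'] from rfl,
    show ("\"".toList) = ['"'] from rfl, show ("'".toList) = ['\''] from rfl,
    show ("&".toList) = ['&'] from rfl, pv_single_isIn]
  rw [Bool.eq_iff_iff]
  simp only [Bool.or_eq_true, List.any_eq_true, List.contains_eq_mem, decide_eq_true_eq,
    List.mem_cons, List.not_mem_nil, or_false, Bool.false_eq_true]
  constructor
  · intro h
    rcases h with h | h | h | h | h
    exacts [⟨'<', h, by simp⟩, ⟨'>', h, by simp⟩, ⟨'"', h, by simp⟩,
            ⟨'\'', h, by simp⟩, ⟨'&', h, by simp⟩]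
  · rintro ⟨ch, hm, rfl | rfl | rfl | rfl | rfl⟩ <;> tauto

theorem validate_company_name_spec : Claim_equal_validate_company_name := by
  intro name _
  unfold Spec_validate_company_name validate_company_name validate_company_name_alt
  simp only [pv_fold_inv, PySem.Str.len_eq, PySem.Str.isIn_eq, PySem.Str.toList_strip]
  rw [pv_any_comm (PySem.Chars.strip name.toList)]
  set l := PySem.Chars.strip name.toList with hl
  set b := l.any (fun ch => PySem.Chars.isIn [ch] "<>\"'&".toList) with hb
  by_cases hnil : name.toList = []
  · have hle : l = [] := by
      rw [hl, hnil]; decide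
    simp [hnil, hle, hb]
  · have h1 : ((name.toList.length : Int) == 0) = false := by
      simp only [beq_eq_false_iff_ne, ne_eq]
      intro h
      have : name.toList.length = 0 := by omega
      exact hnil (List.eq_nil_of_length_eq_zero this)
    by_cases h2 : l.length = 0
    · have hle : l = [] := List.eq_nil_of_length_eq_zero h2
      simp [hle, hb]
    · have h2' : ((l.length : Int) == 0) = false := by
        simp only [beq_eq_false_iff_ne, ne_eq]
        intro h
        have : l.length = 0 := by omega
        exact h2 this
      simp only [h1, h2', Bool.or_self]
      by_cases hlen : 2 ≤ l.length ∧ l.length ≤ 100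
      · have hA : ((decide ((l.length : Int) < 2) || decide ((l.length : Int) > 100))) = false := by
          simp; omega
        simp only [hA]
        cases b with
        | true => simp
        | false => simp; omega
      · have hA : ((decide ((l.length : Int) < 2) || decide ((l.length : Int) > 100))) = true := by
          simp; omega
        simp only [hA, if_true]
        cases b with
        | true => simp
        | false => simp; omega
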